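-- pv_equiv track=rewrite | github.com/Jaeha0526/alphazero_clique | view_game_replay.py | edge_to_vertices
-- ===== SOURCE A (Python) =====
-- def edge_to_vertices(edge_idx, n):
--     """Convert edge index to vertex pair (i, j)."""
--     # For an undirected graph, edge k corresponds to the k-th pair (i,j) with i<j
--     count = 0
--     for i in range(n):
--         for j in range(i+1, n):
--             if count == edge_idx:
--                 return i, j
--             count += 1
--     return None, None
-- ===== SOURCE B (Python) =====
-- def edge_to_vertices(edge_idx, n):
--     """Convert edge index to vertex pair (i, j)."""
--     # Row i holds edges (i, i+1) .. (i, n-1): subtract row sizes until the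
--     # remaining offset falls inside the current row (one pass, O(n)).
--     if edge_idx < 0:
--         return None, None
--     k = edge_idx
--     for i in range(n):
--         row = n - 1 - i
--         if k < row:
--             return i, i + 1 + k
--         k -= row
--     return None, None
-- ===== Notes on version B (the rewrite author's own statement) =====
-- stated objective: faster
-- what changed: Replaces the quadratic nested pair-enumeration with a single pass over rows that subtracts row sizes from the edge index until the offset lands in the current row.
import Mathlib
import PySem

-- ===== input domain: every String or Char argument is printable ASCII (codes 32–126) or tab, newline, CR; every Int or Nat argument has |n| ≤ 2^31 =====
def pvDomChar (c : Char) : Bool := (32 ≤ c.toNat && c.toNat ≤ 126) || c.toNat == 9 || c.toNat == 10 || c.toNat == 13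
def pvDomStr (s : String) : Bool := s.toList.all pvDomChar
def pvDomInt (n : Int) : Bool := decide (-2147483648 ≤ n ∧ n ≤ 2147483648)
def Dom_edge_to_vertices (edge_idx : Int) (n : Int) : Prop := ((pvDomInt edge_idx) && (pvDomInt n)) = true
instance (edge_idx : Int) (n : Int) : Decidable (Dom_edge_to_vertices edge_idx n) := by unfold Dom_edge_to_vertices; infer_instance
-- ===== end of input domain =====

-- B replaces A's quadratic nested pair-enumeration with a single O(n) pass over rows.


-- ===== PORT A =====
-- inner loop: for j in range(i+1, n): if count == edge_idx: return (i, j); count += 1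
-- (the lazy range is iterated by a counter j; the fuel is exactly the remaining iteration count)
def aInnerF (edge_idx : Int) (i : Int) : Nat → Int → Int → Option (Int × Int) × Int
  | 0, _, count => (none, count)
  | fuel + 1, j, count =>
      if count = edge_idx then (some (i, j), count) else aInnerF edge_idx i fuel (j + 1) (count + 1)

def aInner (edge_idx : Int) (i : Int) (n : Int) (j : Int) (count : Int) : Option (Int × Int) × Int :=
  aInnerF edge_idx i (n - j).toNat j count

-- outer loop: for i in range(n): … inner over range(i+1, n) …
def aOuterF (edge_idx : Int) (n : Int) : Nat → Int → Int → List (Option Int)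
  | 0, _, _ => [none, none]
  | fuel + 1, i, count =>
      match aInner edge_idx i n (i + 1) count with
      | (some (a, b), _) => [some a, some b]
      | (none, count') => aOuterF edge_idx n fuel (i + 1) count'

def edge_to_vertices (edge_idx : Int) (n : Int) : List (Option Int) :=
  aOuterF edge_idx n n.toNat 0 0

-- ===== PORT B =====
-- for i in range(n): row = n-1-i; if k < row: return (i, i+1+k); k -= row
def bGoF (n : Int) : Nat → Int → Int → List (Option Int)
  | 0, _, _ => [none, none]
  | fuel + 1, i, k =>
      let row := n - 1 - i
      if k < row then [some i, some (i + 1 + k)] else bGoF n fuel (i + 1) (k - row)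

def edge_to_vertices_alt (edge_idx : Int) (n : Int) : List (Option Int) :=
  if edge_idx < 0 then [none, none]
  else bGoF n n.toNat 0 edge_idx

-- ===== PRECONDITION & SPEC =====
def Spec_edge_to_vertices (edge_idx : Int) (n : Int) (out : List (Option Int)) : Prop := out = edge_to_vertices_alt edge_idx n
instance (edge_idx : Int) (n : Int) (out : List (Option Int)) : Decidable (Spec_edge_to_vertices edge_idx n out) := by unfold Spec_edge_to_vertices; infer_instance

-- ===== CLAIM (what is proved, stated in full; the proofs are below) =====
def Claim_equal_edge_to_vertices : Prop := ∀ (edge_idx : Int) (n : Int), Dom_edge_to_vertices edge_idx n → Spec_edge_to_vertices edge_idx n (edge_to_vertices edge_idx n)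

-- ===== LEMMAS AND PROOFS =====

-- The inner loop finds the pair when edge_idx lies in [count, count + (n - j)).
theorem aInner_hit (e i n : Int) :
    ∀ (m : Nat) (j count : Int), (n - j).toNat = m →
    count ≤ e → e < count + (n - j) →
    aInnerF e i m j count = (some (i, j + (e - count)), e) := by
  intro m
  induction m with
  | zero => intro j count hm h1 h2; omega
  | succ m ih =>
    intro j count hm h1 h2
    by_cases hc : count = e
    · simp [aInnerF, hc]
    · rw [aInnerF, if_neg hc, ih (j + 1) (count + 1) (by omega) (by omega) (by omega)]
      have h3 : j + 1 + (e - (count + 1)) = j + (e - count) := by omega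
      rw [h3]

-- The inner loop misses when edge_idx is outside [count, count + (n - j)), adding the row length to count.
theorem aInner_miss (e i n : Int) :
    ∀ (m : Nat) (j count : Int), (n - j).toNat = m →
    ¬ (count ≤ e ∧ e < count + (n - j)) →
    aInnerF e i m j count = (none, count + ((n - j).toNat : Int)) := by
  intro m
  induction m with
  | zero =>
    intro j count hm _
    rw [aInnerF]
    simp [hm]
  | succ m ih =>
    intro j count hm h
    rw [aInnerF, if_neg (by omega : ¬ count = e),
      ih (j + 1) (count + 1) (by omega) (by omega)]
    have h3 : count + 1 + ((n - (j + 1)).toNat : Int) = count + ((n - j).toNat : Int) := by omega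
    rw [h3]

-- If the counter has already passed edge_idx the outer loop never matches.
theorem aOuter_neg (e n : Int) :
    ∀ (m : Nat) (i0 count : Int), (n - i0).toNat = m → e < count →
    aOuterF e n m i0 count = [none, none] := by
  intro m
  induction m with
  | zero => intro i0 count hm _; rfl
  | succ m ih =>
    intro i0 count hm hlt
    rw [aOuterF]
    unfold aInner
    rw [aInner_miss e i0 n (n - (i0 + 1)).toNat (i0 + 1) count rfl (by omega)]
    exact ih (i0 + 1) (count + ((n - (i0 + 1)).toNat : Int)) (by omega) (by omega)

-- Main invariant: with k = e - count ≥ 0, the two loops agree on the remaining rows.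
theorem outer_eq_bGo (e n : Int) :
    ∀ (m : Nat) (i0 count : Int), (n - i0).toNat = m → count ≤ e →
    aOuterF e n m i0 count = bGoF n m i0 (e - count) := by
  intro m
  induction m with
  | zero => intro i0 count hm _; rfl
  | succ m ih =>
    intro i0 count hm hle
    rw [aOuterF, bGoF]
    unfold aInner
    by_cases hrow : e - count < n - 1 - i0
    · rw [aInner_hit e i0 n (n - (i0 + 1)).toNat (i0 + 1) count rfl hle (by omega)]
      simp only [if_pos hrow]
    · rw [aInner_miss e i0 n (n - (i0 + 1)).toNat (i0 + 1) count rfl (by omega)]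
      simp only [if_neg hrow]
      rw [ih (i0 + 1) (count + ((n - (i0 + 1)).toNat : Int)) (by omega) (by omega)]
      congr 1
      omega

-- ===== VERDICT (by name: the statement is the Claim_ definition above) =====
theorem edge_to_vertices_spec : Claim_equal_edge_to_vertices := by
  intro e n _
  unfold Spec_edge_to_vertices edge_to_vertices edge_to_vertices_alt
  by_cases he : e < 0
  · rw [if_pos he]
    exact aOuter_neg e n n.toNat 0 0 (by omega) he
  · rw [if_neg he]
    have := outer_eq_bGo e n n.toNat 0 0 (by omega) (by omega)
    simpa using this
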